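-- pv_equiv track=rewrite | github.com/Salonosharma2005/ACC45DAYSOFCODE-2024. | Day 8 MONOPOLY2.py | check_monopoly
-- ===== SOURCE A (Python) =====
-- def check_monopoly(T, test_cases):
--     results = []
--
--     for profits in test_cases:
--         P, Q, R, S = profits
--         total_profit = P + Q + R + S
--
--         if (P > total_profit - P or
--             Q > total_profit - Q or
--             R > total_profit - R or
--             S > total_profit - S):
--             results.append("YES")
--         else:
--             results.append("NO")
--
--     return results
-- ===== SOURCE B (Python) =====
-- def check_monopoly(T, test_cases):
--     def verdict(profits):
--         a, b, c, d = sorted(profits)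
--         return "YES" if d > a + b + c else "NO"
--     return [verdict(p) for p in test_cases]
-- ===== Notes on version B (the rewrite author's own statement) =====
-- stated objective: alternative
-- what changed: Per test case B sorts the four profits and compares the largest against the sum of the three smaller ones, instead of A's four-way disjunction of 'X > total - X' tests over a running results accumulator.
import Mathlib
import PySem

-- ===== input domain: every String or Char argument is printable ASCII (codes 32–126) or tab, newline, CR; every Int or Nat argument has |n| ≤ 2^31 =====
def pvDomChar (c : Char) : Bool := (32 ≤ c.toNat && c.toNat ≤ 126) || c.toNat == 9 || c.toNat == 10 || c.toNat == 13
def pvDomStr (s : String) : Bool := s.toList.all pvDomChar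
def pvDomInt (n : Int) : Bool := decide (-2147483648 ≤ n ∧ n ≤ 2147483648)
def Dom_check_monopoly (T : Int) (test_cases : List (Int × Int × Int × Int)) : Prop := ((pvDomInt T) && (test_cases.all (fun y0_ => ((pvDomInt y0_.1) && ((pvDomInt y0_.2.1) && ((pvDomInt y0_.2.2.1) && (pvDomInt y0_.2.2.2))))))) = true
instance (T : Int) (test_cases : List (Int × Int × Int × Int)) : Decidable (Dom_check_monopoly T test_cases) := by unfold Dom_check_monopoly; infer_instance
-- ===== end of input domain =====

-- B sorts each case's four profits and compares the largest with the sum of the three smaller ones, instead of A's four-way disjunction over an accumulator (objective: alternative).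
-- ===== PORT A =====
def check_monopoly (T : Int) (test_cases : List (Int × Int × Int × Int)) : List String :=
  test_cases.foldl
    (fun results profits =>
      let P := profits.1; let Q := profits.2.1; let R := profits.2.2.1; let S := profits.2.2.2
      let total_profit := P + Q + R + S
      if P > total_profit - P ∨ Q > total_profit - Q ∨
         R > total_profit - R ∨ S > total_profit - S then
        results ++ ["YES"]
      else
        results ++ ["NO"])
    []

-- ===== PORT B =====
-- verdict(profits): sort the four profits; the unpacking 'a, b, c, d = sorted(profits)'
-- always succeeds in Python (four elements), so the catch-all branch is unreachable.
def pvVerdict (profits : Int × Int × Int × Int) : String :=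
  match PySem.List.sorted [profits.1, profits.2.1, profits.2.2.1, profits.2.2.2] (fun x => x) false with
  | [a, b, c, d] => if d > a + b + c then "YES" else "NO"
  | _ => "NO"

def check_monopoly_alt (T : Int) (test_cases : List (Int × Int × Int × Int)) : List String :=
  test_cases.map pvVerdict

-- ===== PRECONDITION & SPEC =====
def Spec_check_monopoly (T : Int) (test_cases : List (Int × Int × Int × Int)) (out : List String) : Prop := out = check_monopoly_alt T test_cases
instance (T : Int) (test_cases : List (Int × Int × Int × Int)) (out : List String) : Decidable (Spec_check_monopoly T test_cases out) := by unfold Spec_check_monopoly; infer_instance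

-- ===== CLAIM (what is proved, stated in full; the proofs are below) =====
def Claim_equal_check_monopoly : Prop := ∀ (T : Int) (test_cases : List (Int × Int × Int × Int)), Dom_check_monopoly T test_cases → Spec_check_monopoly T test_cases (check_monopoly T test_cases)

-- ===== LEMMAS AND PROOFS =====

-- the per-case decisions coincide: the sorted-last-vs-rest test equals A's disjunction
set_option maxHeartbeats 1000000 in
theorem pv_cell_eq (p : Int × Int × Int × Int) :
    ((if p.1 > (p.1 + p.2.1 + p.2.2.1 + p.2.2.2) - p.1 ∨
         p.2.1 > (p.1 + p.2.1 + p.2.2.1 + p.2.2.2) - p.2.1 ∨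
         p.2.2.1 > (p.1 + p.2.1 + p.2.2.1 + p.2.2.2) - p.2.2.1 ∨
         p.2.2.2 > (p.1 + p.2.1 + p.2.2.1 + p.2.2.2) - p.2.2.2 then "YES" else "NO") : String) =
    pvVerdict p := by
  obtain ⟨P, Q, R, S⟩ := p
  simp only [pvVerdict, PySem.List.sorted_eq_foldl_insertBy, List.foldl]
  repeat' (simp only [PySem.List.insertBy]; split_ifs)
  all_goals simp_all
  all_goals omega

-- A's append-accumulator fold is the map of its per-case function
theorem pv_foldl_eq_map (l : List (Int × Int × Int × Int)) (acc : List String) :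
    l.foldl
      (fun results profits =>
        let P := profits.1; let Q := profits.2.1; let R := profits.2.2.1; let S := profits.2.2.2
        let total_profit := P + Q + R + S
        if P > total_profit - P ∨ Q > total_profit - Q ∨
           R > total_profit - R ∨ S > total_profit - S then
          results ++ ["YES"]
        else
          results ++ ["NO"]) acc =
    acc ++ l.map (fun p =>
      if p.1 > (p.1 + p.2.1 + p.2.2.1 + p.2.2.2) - p.1 ∨
         p.2.1 > (p.1 + p.2.1 + p.2.2.1 + p.2.2.2) - p.2.1 ∨
         p.2.2.1 > (p.1 + p.2.1 + p.2.2.1 + p.2.2.2) - p.2.2.1 ∨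
         p.2.2.2 > (p.1 + p.2.1 + p.2.2.1 + p.2.2.2) - p.2.2.2 then "YES" else "NO") := by
  induction l generalizing acc with
  | nil => simp
  | cons p t ih =>
    simp only [List.foldl_cons, List.map_cons]
    rw [ih]
    split_ifs <;> simp

-- ===== VERDICT (by name: the statement is the Claim_ definition above) =====
theorem check_monopoly_spec : Claim_equal_check_monopoly := by
  intro T tcs _
  unfold Spec_check_monopoly check_monopoly check_monopoly_alt
  rw [pv_foldl_eq_map]
  simp only [List.nil_append]
  exact List.map_congr_left (fun p _ => pv_cell_eq p)
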